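-- pv_equiv track=rewrite | github.com/ShiotaTakumi/RotationalUnfolding | python/exact/exact_overlap.py | _step_count_counterclockwise
-- ===== SOURCE A (Python) =====
-- def _step_count_counterclockwise(poly, face_id, pre_edge, next_edge):
--     """
--     Count counterclockwise steps from pre_edge to next_edge on the given face.
--
--     面 face_id 上で pre_edge から next_edge まで反時計回りにステップ数を数える。
--
--     Args:
--         poly: Polyhedron structure
--         face_id: Face ID on the original polyhedron
--         pre_edge: Edge ID of the entry edge
--         next_edge: Edge ID of the exit edge
--
--     Returns:
--         int: Number of counterclockwise steps (1-based), or -1 if not found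
--     """
--     edges = poly["adj_edges"][face_id]
--     gon = len(edges)
--
--     try:
--         pos = edges.index(pre_edge)
--     except ValueError:
--         pos = -1
--
--     cnt = 1
--     for step in range(1, gon + 1):
--         idx = (pos + step) % gon
--         if edges[idx] == next_edge:
--             return cnt
--         cnt += 1
--
--     return -1
-- ===== SOURCE B (Python) =====
-- def _step_count_counterclockwise(poly, face_id, pre_edge, next_edge):
--     edges = poly["adj_edges"][face_id]
--     gon = len(edges)
--     pos = edges.index(pre_edge) if pre_edge in edges else -1
--     steps = [(j - pos - 1) % gon + 1 for j, e in enumerate(edges) if e == next_edge]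
--     return min(steps) if steps else -1
-- ===== Notes on version B (the rewrite author's own statement) =====
-- stated objective: simpler
-- what changed: Replaces A's step-by-step counting walk around the face (try/except index + a counter loop over range with early return) by a closed-form modular formula (j - pos - 1) % gon + 1 applied to each occurrence of next_edge in one comprehension, returning the minimum (or -1 if none).
import Mathlib
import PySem

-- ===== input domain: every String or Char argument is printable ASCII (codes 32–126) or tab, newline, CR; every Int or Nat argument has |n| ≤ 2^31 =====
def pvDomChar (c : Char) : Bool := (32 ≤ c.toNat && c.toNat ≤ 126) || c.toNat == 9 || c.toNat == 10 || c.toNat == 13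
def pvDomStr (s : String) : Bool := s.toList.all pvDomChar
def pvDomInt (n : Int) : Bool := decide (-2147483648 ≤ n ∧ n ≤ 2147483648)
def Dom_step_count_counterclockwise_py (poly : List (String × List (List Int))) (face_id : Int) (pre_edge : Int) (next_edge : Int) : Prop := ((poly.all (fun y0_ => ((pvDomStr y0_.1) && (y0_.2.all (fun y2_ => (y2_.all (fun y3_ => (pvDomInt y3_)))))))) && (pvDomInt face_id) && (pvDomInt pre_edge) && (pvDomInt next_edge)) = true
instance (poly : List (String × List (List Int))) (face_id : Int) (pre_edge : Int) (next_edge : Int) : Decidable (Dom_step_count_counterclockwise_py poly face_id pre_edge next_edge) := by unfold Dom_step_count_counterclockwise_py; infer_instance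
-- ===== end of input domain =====

-- B replaces A's counting walk by a closed-form modular index formula per occurrence,
-- taking the minimum over occurrences of next_edge (objective: simpler, loop-free arithmetic).

-- ===== PORT A =====
-- the for-loop of A: early return of cnt on a hit, else cnt += 1
def pvLoopA (edges : List Int) (gon pos next_edge : Int) : List Int → Int → Int
  | [], _ => -1
  | step :: rest, cnt =>
      if PySem.List.pyGetD edges (PySem.Int.mod (pos + step) gon) 0 = next_edge then cnt
      else pvLoopA edges gon pos next_edge rest (cnt + 1)

def step_count_counterclockwise_py (poly : List (String × List (List Int))) (face_id : Int) (pre_edge : Int) (next_edge : Int) : Int :=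
  match List.lookup "adj_edges" poly with
  | none => 0          -- KeyError: excluded by Pre_
  | some faces =>
    match PySem.List.pyGet? faces face_id with
    | none => 0        -- IndexError: excluded by Pre_
    | some edges =>
      let gon : Int := edges.length
      let pos : Int :=
        match PySem.List.index? edges pre_edge with
        | some i => (i : Int)
        | none => -1
      pvLoopA edges gon pos next_edge (PySem.List.pyRange 1 (gon + 1) 1) 1

-- ===== PORT B =====
def step_count_counterclockwise_py_alt (poly : List (String × List (List Int))) (face_id : Int) (pre_edge : Int) (next_edge : Int) : Int :=
  match List.lookup "adj_edges" poly with
  | none => 0          -- KeyError: excluded by Pre_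
  | some faces =>
    match PySem.List.pyGet? faces face_id with
    | none => 0        -- IndexError: excluded by Pre_
    | some edges =>
      let gon : Int := edges.length
      let pos : Int := if pre_edge ∈ edges then ((PySem.List.index? edges pre_edge).getD 0 : Nat) else -1
      let steps : List Int := (PySem.List.enumerate edges 0).filterMap
        (fun je => if je.2 = next_edge then some (PySem.Int.mod (je.1 - pos - 1) gon + 1) else none)
      match PySem.List.min? steps (fun x => x) with
      | some m => m
      | none => -1

-- ===== PRECONDITION & SPEC =====
-- Pre_ excludes exactly the raising inputs: a missing "adj_edges" key (KeyError) and a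
-- face_id out of Python's (negative-wrapping) range (IndexError).
def Pre_step_count_counterclockwise_py (poly : List (String × List (List Int))) (face_id : Int) (pre_edge : Int) (next_edge : Int) : Prop :=
  (List.lookup "adj_edges" poly).isSome = true ∧
  PySem.Raise.InRange ((List.lookup "adj_edges" poly).getD []).length face_id
instance (poly : List (String × List (List Int))) (face_id : Int) (pre_edge : Int) (next_edge : Int) : Decidable (Pre_step_count_counterclockwise_py poly face_id pre_edge next_edge) := by unfold Pre_step_count_counterclockwise_py; infer_instance

def pvWitness_step_count_counterclockwise_py : (List (String × List (List Int))) × Int × Int × Int :=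
  ([("adj_edges", [[10, 11, 12], [12, 13, 10]])], 1, 13, 10)

def Spec_step_count_counterclockwise_py (poly : List (String × List (List Int))) (face_id : Int) (pre_edge : Int) (next_edge : Int) (out : Int) : Prop := out = step_count_counterclockwise_py_alt poly face_id pre_edge next_edge
instance (poly : List (String × List (List Int))) (face_id : Int) (pre_edge : Int) (next_edge : Int) (out : Int) : Decidable (Spec_step_count_counterclockwise_py poly face_id pre_edge next_edge out) := by unfold Spec_step_count_counterclockwise_py; infer_instance

-- ===== CLAIM (what is proved, stated in full; the proofs are below) =====
def Claim_equal_step_count_counterclockwise_py : Prop := ∀ (poly : List (String × List (List Int))) (face_id : Int) (pre_edge : Int) (next_edge : Int), Dom_step_count_counterclockwise_py poly face_id pre_edge next_edge → Pre_step_count_counterclockwise_py poly face_id pre_edge next_edge → Spec_step_count_counterclockwise_py poly face_id pre_edge next_edge (step_count_counterclockwise_py poly face_id pre_edge next_edge)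

-- ===== LEMMAS AND PROOFS =====

theorem loop_char (edges : List Int) (gon pos ne b : Int) :
    ∀ (n : Nat) (a : Int), (b - a).toNat = n →
      pvLoopA edges gon pos ne (PySem.List.pyRange a b 1) a =
      ((PySem.List.pyRange a b 1).find?
        (fun s => PySem.List.pyGetD edges (PySem.Int.mod (pos + s) gon) 0 == ne)).getD (-1) := by
  intro n
  induction n with
  | zero =>
    intro a h
    rw [PySem.List.pyRange_one_eq_nil (by omega)]
    rfl
  | succ k ih =>
    intro a h
    rw [PySem.List.pyRange_one_cons (by omega)]
    rw [List.find?_cons]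
    by_cases hp : PySem.List.pyGetD edges (PySem.Int.mod (pos + a) gon) 0 = ne
    · simp [pvLoopA, hp]
    · simp only [pvLoopA, hp, if_false,
        show ((PySem.List.pyGetD edges (PySem.Int.mod (pos + a) gon) 0 == ne) = false) from beq_eq_false_iff_ne.mpr hp]
      exact ih (a + 1) (by omega)

theorem find?_sorted_min {l : List Int} {p : Int → Bool} {m : Int}
    (hs : l.Pairwise (· < ·)) (hf : l.find? p = some m) :
    ∀ x ∈ l, p x = true → m ≤ x := by
  induction l with
  | nil => simp at hf
  | cons a t ih =>
    rw [List.find?_cons] at hf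
    rcases List.pairwise_cons.mp hs with ⟨ha, ht⟩
    cases hpa : p a with
    | true =>
      rw [hpa] at hf; simp at hf; subst hf
      intro x hx _
      rcases List.mem_cons.mp hx with rfl | hx
      · exact le_refl _
      · exact le_of_lt (ha x hx)
    | false =>
      rw [hpa] at hf; simp at hf
      intro x hx hpx
      rcases List.mem_cons.mp hx with rfl | hx
      · rw [hpa] at hpx; exact absurd hpx (by simp)
      · exact ih ht hf x hx hpx

theorem emod_shift1 (gon pos s : Int) (h1 : 1 ≤ s) (h2 : s ≤ gon) :
    ((pos + s) % gon - pos - 1) % gon = s - 1 := by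
  have hq : (pos + s) % gon - pos - 1 = (s - 1) + gon * (-((pos + s) / gon)) := by
    rw [Int.emod_def]; ring
  rw [hq, Int.add_mul_emod_self_left, Int.emod_eq_of_lt (by omega) (by omega)]

theorem emod_shift2 (gon pos j : Int) (h1 : 0 ≤ j) (h2 : j < gon) :
    (pos + ((j - pos - 1) % gon + 1)) % gon = j := by
  have hq : pos + ((j - pos - 1) % gon + 1) = j + gon * (-((j - pos - 1) / gon)) := by
    rw [Int.emod_def]; ring
  rw [hq, Int.add_mul_emod_self_left, Int.emod_eq_of_lt (by omega) (by omega)]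

theorem main_core (edges : List Int) (pos next_edge : Int) :
    pvLoopA edges edges.length pos next_edge (PySem.List.pyRange 1 ((edges.length : Int) + 1) 1) 1 =
    (match PySem.List.min? ((PySem.List.enumerate edges 0).filterMap
        (fun je => if je.2 = next_edge then some (PySem.Int.mod (je.1 - pos - 1) edges.length + 1) else none)) (fun x => x) with
      | some m => m
      | none => -1) := by
  rcases eq_or_ne edges [] with rfl | hne
  · simp [pvLoopA, PySem.List.pyRange_one_eq_nil, PySem.List.enumerate, PySem.List.min?]
  · have hg : (0:Int) < (edges.length : Int) := by
      have := List.length_pos_iff.mpr hne; omega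
    have hmod : ∀ a : Int, PySem.Int.mod a (edges.length : Int) = a % (edges.length : Int) :=
      fun a => PySem.Int.mod_eq_emod_of_pos hg
    rw [loop_char edges (edges.length) pos next_edge ((edges.length : Int) + 1)
      ((edges.length : Int)).toNat 1 (by omega)]
    rw [PySem.List.enumerate_eq_map_pyRange edges 0, List.filterMap_map]
    simp only [hmod, PySem.List.len_eq, Function.comp]
    set gon : Int := (edges.length : Int) with hgondef
    set p : Int → Bool := fun s => PySem.List.pyGetD edges ((pos + s) % gon) 0 == next_edge with hpdef
    set g : Int → Option Int :=
      fun j => if PySem.List.pyGetD edges j 0 = next_edge then some ((j - pos - 1) % gon + 1) else none with hgdef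
    set steps := (PySem.List.pyRange 0 gon 1).filterMap g with hstepsdef
    have hfw : ∀ m ∈ steps, (1 ≤ m ∧ m ≤ gon) ∧ p m = true := by
      intro m hm
      rcases List.mem_filterMap.mp hm with ⟨j, hj, hgj⟩
      rcases PySem.List.mem_pyRange_one.mp hj with ⟨hj0, hjg⟩
      by_cases hc : PySem.List.pyGetD edges j 0 = next_edge
      · rw [hgdef] at hgj
        simp only [hc, if_true, Option.some_inj] at hgj
        subst hgj
        have hr0 : 0 ≤ (j - pos - 1) % gon := Int.emod_nonneg _ (by omega)
        have hr1 : (j - pos - 1) % gon < gon := Int.emod_lt_of_pos _ hg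
        refine ⟨⟨by omega, by omega⟩, ?_⟩
        rw [hpdef]
        simp only [emod_shift2 gon pos j hj0 hjg, beq_iff_eq]
        exact hc
      · rw [hgdef] at hgj; simp [hc] at hgj
    have hbw : ∀ s : Int, 1 ≤ s → s ≤ gon → p s = true → s ∈ steps := by
      intro s h1 h2 hp
      refine List.mem_filterMap.mpr ⟨(pos + s) % gon, ?_, ?_⟩
      · exact PySem.List.mem_pyRange_one.mpr ⟨Int.emod_nonneg _ (by omega), Int.emod_lt_of_pos _ hg⟩
      · rw [hpdef] at hp
        simp only [beq_iff_eq] at hp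
        rw [hgdef]
        simp only [hp, if_true, emod_shift1 gon pos s h1 h2, Option.some_inj]
        omega
    cases hf : (PySem.List.pyRange 1 (gon + 1) 1).find? p with
    | none =>
      have hsteps : steps = [] := by
        rw [List.eq_nil_iff_forall_not_mem]
        intro m hm
        rcases hfw m hm with ⟨⟨hm1, hm2⟩, hpm⟩
        have := List.find?_eq_none.mp hf m (PySem.List.mem_pyRange_one.mpr ⟨by omega, by omega⟩)
        rw [hpm] at this; exact absurd this (by simp)
      rw [hsteps]
      simp [PySem.List.min?]
    | some m =>
      have hpm : p m = true := List.find?_some hf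
      have hmb := PySem.List.mem_pyRange_one.mp (List.mem_of_find?_eq_some hf)
      have hmin : ∀ x ∈ PySem.List.pyRange 1 (gon + 1) 1, p x = true → m ≤ x :=
        find?_sorted_min (PySem.List.pairwise_lt_pyRange_one 1 (gon + 1)) hf
      have hmsteps : m ∈ steps := hbw m hmb.1 (by omega) hpm
      cases hm' : PySem.List.min? steps (fun x => x) with
      | none =>
        rw [(PySem.List.min?_eq_none_iff steps _).mp hm'] at hmsteps
        exact absurd hmsteps (by simp)
      | some m' =>
        have hle : m' ≤ m := PySem.List.min?_isMin hm' m hmsteps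
        rcases hfw m' (PySem.List.min?_mem hm') with ⟨⟨h1', h2'⟩, hpm'⟩
        have hge : m ≤ m' := hmin m' (PySem.List.mem_pyRange_one.mpr ⟨by omega, by omega⟩) hpm'
        simp only [Option.getD_some]
        omega

-- ===== VERDICT (by name: the statement is the Claim_ definition above) =====
theorem step_count_counterclockwise_py_spec : Claim_equal_step_count_counterclockwise_py := by
  intro poly face_id pre_edge next_edge _ hpre
  obtain ⟨hsome, _⟩ := hpre
  unfold Spec_step_count_counterclockwise_py
  unfold step_count_counterclockwise_py step_count_counterclockwise_py_alt
  cases hlk : List.lookup "adj_edges" poly with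
  | none => simp [hlk] at hsome
  | some faces =>
    cases hget : PySem.List.pyGet? faces face_id with
    | none => simp only [hget]
    | some edges =>
      simp only [hget]
      have hpos : (match PySem.List.index? edges pre_edge with
          | some i => (i : Int)
          | none => -1) =
          (if pre_edge ∈ edges then (((PySem.List.index? edges pre_edge).getD 0 : Nat) : Int) else -1) := by
        cases hidx : PySem.List.index? edges pre_edge with
        | none =>
          have : pre_edge ∉ edges := (PySem.List.index?_eq_none_iff _ _).mp hidx
          simp [this]
        | some i =>
          have : pre_edge ∈ edges := (PySem.List.index?_isSome_iff _ _).mp (by rw [hidx]; rfl)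
          simp [this, hidx]
      rw [hpos]
      exact main_core edges _ next_edge
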